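/- GENERATED by tools/from_farm_form.py from prooffarm-gif/accepted/DGifDecompressLine.3/Proof.lean (a worked proof of the farm's unit `DGifDecompressLine.3`,
   accepted by the verdict) — do not edit. -/
import Gif.Spec.Units.DGifDecompressLine_3
import Gif.Spec.AllSegs
import Gif.Spec.Proved.DGifDecompressLine_3_Lemmas

open X86 X86.User Asan ProgX.Base ProgX.Base.Spec Gif.Spec

/-!
  `DGifDecompressLine.3` (0x106f7d … 0x106fa0, 0x107080 … 0x107098, 0x1070ba … 0x1070c1, 18 instructions; dgif_lib.c:888-891,
  999-1003): THE HEAD OF THE MAIN LOOP OF THE LZW DECODER, a body segment of a protected function with a call in the middle. The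
  call's return address 0x106f98 (`ret33`) is not a cut of the design, so the unit makes it one of its own: the private assertion
  `dl3_AtRet` (`Main` + the test of l.888 + what the callee's post says) and two walks (Lemmas.lean), chained here.
-/

/-- Segment 3 of `DGifDecompressLine` takes `Head` at 0x106f7d to `Decoded` at 0x106fa0 (DGifDecompressInput delivered a code) or to
`Done` at 0x10709d (the line is complete: the write-back of l.999-1000, `eax = 1`; or the callee failed: `eax = 0`). -/
theorem Gif.Spec.Proved.DGifDecompressLine_3_ok : Gif.Spec.DGifDecompressLine_3.Statement := by
  intro Lay hLay μ hμ u₀ hcode h_DGifDecompressInput H rest frames F R n m e ret v hat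
  -- the callee's contract for the frame list of the body (the own frame in front)
  have hdi := h_DGifDecompressInput H rest (DGifDecompressLine.framesIn frames e) F R
  -- 0x106f7d … the call … 0x106f98, or 0x106f7d … 0x107080 … 0x10709d
  refine (Gif.Spec.DGifDecompressLine_3.dl3_seg_head Lay hLay μ hμ u₀ hcode H rest frames F R n m e ret hdi v hat).trans ?_
  intro v1 hv1
  rcases hv1 with hv1 | hv1
  · -- 0x106f98 … 0x106fa0, or 0x106f98 … 0x1070ba … 0x10709d
    exact Gif.Spec.DGifDecompressLine_3.dl3_seg_tail Lay hLay μ hμ u₀ hcode H rest frames F R n m e ret v1 hv1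
  · -- already at the epilogue
    exact ReachVia.done (Or.inr hv1)
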